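-- pv_equiv track=rewrite | github.com/stanislavvv/fb2_srv_pseudostatic | app/validate.py | unurl
-- ===== SOURCE A (Python) =====
-- def unurl(s: str):
--     tr = {
--         '%22': '"',
--         '%27': "'",
--         '%2E': ".",
--         '%2F': '/'
--     }
--     ret = s
--     if ret is not None:
--         for r, v in tr.items():
--             ret = ret.replace(r, v)
--     return ret
-- ===== SOURCE B (Python) =====
-- def unurl(s: str):
--     # Single left-to-right scan instead of four sequential .replace passes.
--     if s is None:
--         return s
--     tr = {
--         '%22': '"',
--         '%27': "'",
--         '%2E': ".",
--         '%2F': '/'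
--     }
--     out = []
--     i = 0
--     n = len(s)
--     while i < n:
--         ch = tr.get(s[i:i + 3])
--         if ch is not None:
--             out.append(ch)
--             i += 3
--         else:
--             out.append(s[i])
--             i += 1
--     return ''.join(out)
-- ===== Notes on version B (the rewrite author's own statement) =====
-- stated objective: alternative
-- what changed: Replaces four sequential str.replace passes (each rescanning the whole string) with one explicit left-to-right scan that looks each 3-char window up in the escape table and emits the decoded char or the current char.
import Mathlib
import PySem

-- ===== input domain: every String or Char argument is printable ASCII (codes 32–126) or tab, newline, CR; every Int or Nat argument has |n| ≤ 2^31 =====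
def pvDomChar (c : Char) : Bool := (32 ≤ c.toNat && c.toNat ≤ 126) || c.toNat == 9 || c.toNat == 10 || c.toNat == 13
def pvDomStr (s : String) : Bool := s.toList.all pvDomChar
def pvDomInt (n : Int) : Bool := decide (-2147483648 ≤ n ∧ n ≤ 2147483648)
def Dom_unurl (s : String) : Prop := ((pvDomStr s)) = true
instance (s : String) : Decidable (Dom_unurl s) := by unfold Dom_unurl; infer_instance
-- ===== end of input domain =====

-- B replaces A's four sequential .replace passes by one left-to-right scan with a
-- 3-char-window table lookup; return value proved equal on all strings.

-- ===== PORT A =====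
-- A: dict literal tr, then for each (r, v) in tr.items(): ret = ret.replace(r, v).
-- ('ret is not None' is always true here: the argument has type String.)
def unurl (s : String) : String :=
  let tr : PySem.Dict String String :=
    PySem.Dict.mk [("%22", "\""), ("%27", "'"), ("%2E", "."), ("%2F", "/")]
  tr.items.foldl (fun ret rv => PySem.Str.replace ret rv.1 rv.2) s

-- ===== PORT B =====
-- B's escape table {code: char} (keys as 3-char lists).
def unurlTr : List (List Char × Char) :=
  [(['%', '2', '2'], '"'), (['%', '2', '7'], '\''), (['%', '2', 'E'], '.'), (['%', '2', 'F'], '/')]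

-- B's single scan: tr.get(s[i:i+3]) — a window shorter than 3 chars never matches
-- a 3-char key, so the two short fallback arms cover the tail exactly as tr.get → None does.
def unurlScan : List Char → List Char
  | c :: x :: y :: t =>
    match List.lookup [c, x, y] unurlTr with
    | some ch => ch :: unurlScan t
    | none => c :: unurlScan (x :: y :: t)
  | c :: t => c :: unurlScan t
  | [] => []

def unurl_alt (s : String) : String := String.ofList (unurlScan s.toList)

-- ===== PRECONDITION & SPEC =====
def Spec_unurl (s : String) (out : String) : Prop := out = unurl_alt s
instance (s : String) (out : String) : Decidable (Spec_unurl s out) := by unfold Spec_unurl; infer_instance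

-- ===== CLAIM (what is proved, stated in full; the proofs are below) =====
def Claim_equal_unurl : Prop := ∀ (s : String), Dom_unurl s → Spec_unurl s (unurl s)

-- ===== LEMMAS AND PROOFS =====

-- A simple recursive model of Python str.replace with a non-empty pattern.
def repS (old new : List Char) : List Char → List Char
  | [] => []
  | c :: t =>
    if old.isPrefixOf (c :: t) then new ++ repS old new (t.drop (old.length - 1))
    else c :: repS old new t
termination_by l => l.length
decreasing_by
  · simp only [List.length_drop, List.length_cons]; omega
  · simp only [List.length_cons]; omega

theorem repS_nil (old new : List Char) : repS old new [] = [] := by simp [repS]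

theorem repS_cons_pos (old new : List Char) (c : Char) (t : List Char)
    (h : old.isPrefixOf (c :: t) = true) :
    repS old new (c :: t) = new ++ repS old new (t.drop (old.length - 1)) := by
  rw [repS, if_pos (by simp [h])]

theorem repS_cons_neg (old new : List Char) (c : Char) (t : List Char)
    (h : old.isPrefixOf (c :: t) = false) :
    repS old new (c :: t) = c :: repS old new t := by
  rw [repS, if_neg (by simp [h])]

theorem go_eq (old new : List Char) (hne : old ≠ []) :
    ∀ (fuel : Nat) (l acc : List Char), l.length ≤ fuel →
      PySem.Chars.replace.go old new fuel l acc = acc.reverse ++ repS old new l := by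
  intro fuel
  induction fuel with
  | zero =>
    intro l acc hl
    have : l = [] := by cases l <;> simp_all
    subst this
    simp [PySem.Chars.replace.go, repS_nil]
  | succ n ih =>
    intro l acc hl
    cases l with
    | nil => simp [PySem.Chars.replace.go, repS_nil]
    | cons c t =>
      rw [PySem.Chars.replace.go]
      cases hp : old.isPrefixOf (c :: t) with
      | true =>
        rw [if_pos rfl]
        obtain ⟨k, hk⟩ : ∃ k, old.length = k + 1 := by
          cases old with
          | nil => exact absurd rfl hne
          | cons a as => exact ⟨as.length, by simp⟩
        have hdrop : List.drop old.length (c :: t) = t.drop (old.length - 1) := by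
          rw [hk]; simp
        rw [hdrop, ih _ _ (by simp only [List.length_drop]; simp at hl; omega)]
        rw [repS_cons_pos old new c t hp]
        simp
      | false =>
        rw [if_neg (by simp)]
        rw [ih _ _ (by simp at hl; omega)]
        rw [repS_cons_neg old new c t hp]
        simp

theorem replace_eq (l old new : List Char) (hne : old ≠ []) :
    PySem.Chars.replace l old new = repS old new l := by
  rw [PySem.Chars.replace, if_neg (by simp [List.isEmpty_iff, hne])]
  simpa using go_eq old new hne l.length l [] le_rfl

-- the four-pass chain of A, on char lists
def chainA (l : List Char) : List Char :=
  repS ['%', '2', 'F'] ['/'] (repS ['%', '2', 'E'] ['.']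
    (repS ['%', '2', '7'] ['\''] (repS ['%', '2', '2'] ['"'] l)))

-- one pass steps over a head that is not '%'
theorem repS_skip (x : Char) (new : List Char) (c : Char) (w : List Char) (hc : c ≠ '%') :
    repS ['%', '2', x] new (c :: w) = c :: repS ['%', '2', x] new w := by
  apply repS_cons_neg
  simp [List.isPrefixOf]
  intro h
  exact absurd h.symm hc

-- one pass steps over a whole non-matching window '%2y' (y ≠ x, y ≠ '%')
theorem repS_skip3 (x y : Char) (new : List Char) (w : List Char)
    (hyx : y ≠ x) (hyp : y ≠ '%') :
    repS ['%', '2', x] new ('%' :: '2' :: y :: w)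
      = '%' :: '2' :: y :: repS ['%', '2', x] new w := by
  rw [repS_cons_neg _ _ _ _ (by simp [List.isPrefixOf]; exact fun h => absurd h.symm hyx)]
  rw [repS_cons_neg _ _ _ _ (by simp [List.isPrefixOf])]
  rw [repS_skip _ _ _ _ hyp]

-- one pass consumes its own escape code
theorem repS_hit (x : Char) (new : List Char) (w : List Char) :
    repS ['%', '2', x] new ('%' :: '2' :: x :: w) = new ++ repS ['%', '2', x] new w := by
  rw [repS_cons_pos _ _ _ _ (by simp [List.isPrefixOf])]
  norm_num

theorem chainA_nil : chainA [] = [] := by simp [chainA, repS_nil]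

theorem chainA_hit2 (t : List Char) : chainA ('%' :: '2' :: '2' :: t) = '"' :: chainA t := by
  unfold chainA
  rw [repS_hit, List.singleton_append,
      repS_skip _ _ _ _ (by decide), repS_skip _ _ _ _ (by decide),
      repS_skip _ _ _ _ (by decide)]

theorem chainA_hit7 (t : List Char) : chainA ('%' :: '2' :: '7' :: t) = '\'' :: chainA t := by
  unfold chainA
  rw [repS_skip3 _ _ _ _ (by decide) (by decide), repS_hit, List.singleton_append,
      repS_skip _ _ _ _ (by decide), repS_skip _ _ _ _ (by decide)]

theorem chainA_hitE (t : List Char) : chainA ('%' :: '2' :: 'E' :: t) = '.' :: chainA t := by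
  unfold chainA
  rw [repS_skip3 _ _ _ _ (by decide) (by decide), repS_skip3 _ _ _ _ (by decide) (by decide),
      repS_hit, List.singleton_append, repS_skip _ _ _ _ (by decide)]

theorem chainA_hitF (t : List Char) : chainA ('%' :: '2' :: 'F' :: t) = '/' :: chainA t := by
  unfold chainA
  rw [repS_skip3 _ _ _ _ (by decide) (by decide), repS_skip3 _ _ _ _ (by decide) (by decide),
      repS_skip3 _ _ _ _ (by decide) (by decide), repS_hit, List.singleton_append]

-- pull one produced char back through one replace pass (the replacement char q is excluded)
theorem repS_eq_cons (p : List Char) (q x : Char) (hq : x ≠ q) {t u : List Char}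
    (h : repS p [q] t = x :: u) :
    ∃ t', t = x :: t' ∧ u = repS p [q] t' := by
  cases t with
  | nil => rw [repS_nil] at h; exact absurd h (by simp)
  | cons c t' =>
    cases hp : p.isPrefixOf (c :: t') with
    | true =>
      rw [repS_cons_pos _ _ _ _ hp] at h
      simp at h
      exact absurd h.1.symm hq
    | false =>
      rw [repS_cons_neg _ _ _ _ hp] at h
      simp at h
      exact ⟨t', by simp [h.1, h.2]⟩

-- pull a two-char window '2',x back through one pass (q is none of '2', x)
theorem repS_pull2 (p : List Char) (q x : Char) (hq2 : ('2' : Char) ≠ q) (hqx : x ≠ q)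
    {t u : List Char} (h : repS p [q] t = '2' :: x :: u) :
    ∃ u', t = '2' :: x :: u' := by
  obtain ⟨t', ht, hu⟩ := repS_eq_cons p q '2' hq2 h
  obtain ⟨t'', ht', _⟩ := repS_eq_cons p q x hqx hu.symm
  exact ⟨t'', by rw [ht, ht']⟩

-- the window ['%','2',x] is not a prefix of '%' :: w when w does not start with '2', x
theorem not_prefix_of_pull (x : Char) (w : List Char)
    (hw : ∀ u, w ≠ '2' :: x :: u) :
    (['%', '2', x].isPrefixOf ('%' :: w)) = false := by
  cases w with
  | nil => simp [List.isPrefixOf]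
  | cons a w' =>
    cases w' with
    | nil => simp [List.isPrefixOf]
    | cons b w'' =>
      by_cases ha : a = '2'
      · by_cases hb : b = x
        · exact absurd (by rw [ha, hb]) (hw w'')
        · subst ha; simp [List.isPrefixOf]; intro h; exact absurd h.symm hb
      · simp [List.isPrefixOf]; intro h; exact absurd h.symm ha

-- one step of the chain when the 3-char window at the front matches no escape code
theorem chainA_cons (c : Char) (t : List Char)
    (hno : ∀ x u, c = '%' → t = '2' :: x :: u →
      ¬(x = '2' ∨ x = '7' ∨ x = 'E' ∨ x = 'F')) :
    chainA (c :: t) = c :: chainA t := by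
  by_cases hc : c = '%'
  · subst hc
    have key : ∀ (x : Char), (x = '2' ∨ x = '7' ∨ x = 'E' ∨ x = 'F') →
        ∀ u, t ≠ '2' :: x :: u := by
      intro x hx u ht
      exact hno x u rfl ht hx
    have h1 : (['%', '2', '2'].isPrefixOf ('%' :: t)) = false :=
      not_prefix_of_pull '2' t (fun u => key '2' (by simp) u)
    have e1 := repS_cons_neg ['%','2','2'] ['"'] '%' t h1
    have h2 : (['%', '2', '7'].isPrefixOf ('%' :: repS ['%','2','2'] ['"'] t)) = false := by
      apply not_prefix_of_pull
      intro u hu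
      obtain ⟨u', hu'⟩ := repS_pull2 _ _ _ (by decide) (by decide) hu
      exact key '7' (by simp) u' hu'
    have e2 := repS_cons_neg ['%','2','7'] ['\''] '%' (repS ['%','2','2'] ['"'] t) h2
    have h3 : (['%', '2', 'E'].isPrefixOf
        ('%' :: repS ['%','2','7'] ['\''] (repS ['%','2','2'] ['"'] t))) = false := by
      apply not_prefix_of_pull
      intro u hu
      obtain ⟨u', hu'⟩ := repS_pull2 _ _ _ (by decide) (by decide) hu
      obtain ⟨u'', hu''⟩ := repS_pull2 _ _ _ (by decide) (by decide) hu'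
      exact key 'E' (by simp) u'' hu''
    have e3 := repS_cons_neg ['%','2','E'] ['.'] '%'
      (repS ['%','2','7'] ['\''] (repS ['%','2','2'] ['"'] t)) h3
    have h4 : (['%', '2', 'F'].isPrefixOf
        ('%' :: repS ['%','2','E'] ['.'] (repS ['%','2','7'] ['\''] (repS ['%','2','2'] ['"'] t)))) = false := by
      apply not_prefix_of_pull
      intro u hu
      obtain ⟨u', hu'⟩ := repS_pull2 _ _ _ (by decide) (by decide) hu
      obtain ⟨u'', hu''⟩ := repS_pull2 _ _ _ (by decide) (by decide) hu'
      obtain ⟨u3, hu3⟩ := repS_pull2 _ _ _ (by decide) (by decide) hu''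
      exact key 'F' (by simp) u3 hu3
    unfold chainA
    rw [e1, e2, e3, repS_cons_neg _ _ _ _ h4]
  · unfold chainA
    rw [repS_skip _ _ _ _ hc, repS_skip _ _ _ _ hc, repS_skip _ _ _ _ hc, repS_skip _ _ _ _ hc]

theorem chainA_eq_scan : ∀ l, chainA l = unurlScan l := by
  intro l
  induction l using unurlScan.induct with
  | case1 c x y t ch hl IH =>
    rw [unurlScan, hl]
    by_cases h2 : [c, x, y] = ['%', '2', '2']
    · simp only [List.cons.injEq, and_true] at h2
      obtain ⟨hc, hx, hy⟩ := h2; subst hc; subst hx; subst hy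
      simp only [unurlTr, List.lookup] at hl
      simp at hl
      rw [chainA_hit2, IH, hl]
    · by_cases h7 : [c, x, y] = ['%', '2', '7']
      · simp only [List.cons.injEq, and_true] at h7
        obtain ⟨hc, hx, hy⟩ := h7; subst hc; subst hx; subst hy
        simp only [unurlTr, List.lookup] at hl
        simp at hl
        rw [chainA_hit7, IH, hl]
      · by_cases hE : [c, x, y] = ['%', '2', 'E']
        · simp only [List.cons.injEq, and_true] at hE
          obtain ⟨hc, hx, hy⟩ := hE; subst hc; subst hx; subst hy
          simp only [unurlTr, List.lookup] at hl
          simp at hl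
          rw [chainA_hitE, IH, hl]
        · by_cases hF : [c, x, y] = ['%', '2', 'F']
          · simp only [List.cons.injEq, and_true] at hF
            obtain ⟨hc, hx, hy⟩ := hF; subst hc; subst hx; subst hy
            simp only [unurlTr, List.lookup] at hl
            simp at hl
            rw [chainA_hitF, IH, hl]
          · exfalso
            simp only [unurlTr, List.lookup] at hl
            by_cases hc : c = '%'
            · subst hc
              by_cases hx : x = '2'
              · subst hx
                have hy2 : y ≠ '2' := fun h => h2 (by rw [h])
                have hy7 : y ≠ '7' := fun h => h7 (by rw [h])
                have hyE : y ≠ 'E' := fun h => hE (by rw [h])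
                have hyF : y ≠ 'F' := fun h => hF (by rw [h])
                have b2 : (y == '2') = false := beq_eq_false_iff_ne.mpr hy2
                have b7 : (y == '7') = false := beq_eq_false_iff_ne.mpr hy7
                have bE : (y == 'E') = false := beq_eq_false_iff_ne.mpr hyE
                have bF : (y == 'F') = false := beq_eq_false_iff_ne.mpr hyF
                simp [b2, b7, bE, bF] at hl
              · have bx : (x == '2') = false := beq_eq_false_iff_ne.mpr hx
                simp [bx] at hl
            · have bc : (c == '%') = false := beq_eq_false_iff_ne.mpr hc
              simp [bc] at hl
  | case2 c x y t hl IH =>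
    rw [unurlScan, hl, ← IH]
    apply chainA_cons
    intro x' u hc ht hx'
    subst hc
    simp only [List.cons.injEq] at ht
    obtain ⟨hx, rest⟩ := ht
    obtain ⟨hy, hu⟩ := rest
    subst hx; subst hy
    rcases hx' with h | h | h | h <;> subst h <;>
      simp [unurlTr, List.lookup] at hl
  | case3 c t h IH =>
    have step : chainA (c :: t) = c :: chainA t := by
      apply chainA_cons
      intro x u _ ht
      exact (h '2' x u ht).elim
    cases t with
    | nil => rw [step, chainA_nil]; simp [unurlScan]
    | cons d t' =>
      cases t' with
      | nil => rw [step, IH]; simp [unurlScan]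
      | cons e t'' => exact (h d e t'' rfl).elim
  | case4 => rw [chainA_nil]; simp [unurlScan]

theorem unurl_toList (s : String) : (unurl s).toList = chainA s.toList := by
  unfold unurl chainA
  simp only [List.foldl]
  simp only [PySem.Str.toList_replace]
  rw [replace_eq _ _ _ (by decide), replace_eq _ _ _ (by decide),
      replace_eq _ _ _ (by decide), replace_eq _ _ _ (by decide)]
  rfl

-- ===== VERDICT (by name: the statement is the Claim_ definition above) =====
theorem unurl_spec : Claim_equal_unurl := by
  intro s _
  unfold Spec_unurl unurl_alt
  rw [← chainA_eq_scan, ← unurl_toList, String.ofList_toList]
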